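-- pv_equiv track=rewrite | github.com/nekloyh/daily-leetcode | leetcode/python/2014-longestSubsequenceRepeatedKTimes.py | isK
-- ===== SOURCE A (Python) =====
-- def isK(sub: str, t: str, k: int) -> bool:
--     count = i = 0
--     for ch in t:
--         if i < len(sub) and ch == sub[i]:
--             i += 1
--             if i == len(sub):
--                 i = 0
--                 count += 1
--                 if count == k:
--                     return True
--     return False
-- ===== SOURCE B (Python) =====
-- def isK(sub: str, t: str, k: int) -> bool:
--     if not sub or k <= 0:
--         return False
--     # index: for each character, the sorted list of its positions in t
--     pos = {}
--     for idx, ch in enumerate(t):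
--         pos.setdefault(ch, []).append(idx)
--     cur = -1
--     for _ in range(k):
--         for ch in sub:
--             lst = pos.get(ch, [])
--             # binary search for the first position in lst strictly greater than cur
--             lo, hi = 0, len(lst)
--             while lo < hi:
--                 mid = (lo + hi) // 2
--                 if lst[mid] > cur:
--                     hi = mid
--                 else:
--                     lo = mid + 1
--             if lo == len(lst):
--                 return False
--             cur = lst[lo]
--     return True
-- ===== Notes on version B (the rewrite author's own statement) =====
-- stated objective: alternative
-- what changed: B replaces A's single left-to-right scan of t (cyclic pattern index plus completion counter) by a char->positions hash index built once over t, after which each needed pattern character is found by binary search for its next occurrence, so t is never scanned per character; degenerate sub=='' / k<=0 return False up front.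
import Mathlib
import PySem

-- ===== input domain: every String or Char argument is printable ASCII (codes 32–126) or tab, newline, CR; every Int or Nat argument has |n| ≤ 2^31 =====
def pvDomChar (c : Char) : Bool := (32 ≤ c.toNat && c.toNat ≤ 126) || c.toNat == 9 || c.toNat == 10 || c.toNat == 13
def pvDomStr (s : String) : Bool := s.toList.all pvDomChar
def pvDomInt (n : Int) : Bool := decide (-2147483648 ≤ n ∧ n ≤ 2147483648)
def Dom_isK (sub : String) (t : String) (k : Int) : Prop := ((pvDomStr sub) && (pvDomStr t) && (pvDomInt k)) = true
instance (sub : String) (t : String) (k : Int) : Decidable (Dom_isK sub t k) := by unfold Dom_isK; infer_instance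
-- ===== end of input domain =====

-- B replaces A's single scan of t (cyclic pattern index + completion counter) by a
-- char->positions index over t queried by hand-written binary search (objective: alternative).


-- ===== PORT A =====
-- the for-loop over t with state (count, i) and early return on count == k
def isKLoop (sub : List Char) (k : Int) : List Char → Int → Int → Bool
  | [], _, _ => false
  | ch :: rest, count, i =>
    if i < (sub.length : Int) ∧ PySem.List.pyGet? sub i = some ch then
      if i + 1 = (sub.length : Int) then
        if count + 1 = k then true
        else isKLoop sub k rest (count + 1) 0
      else isKLoop sub k rest count (i + 1)
    else isKLoop sub k rest count i

def isK (sub : String) (t : String) (k : Int) : Bool :=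
  isKLoop sub.toList k t.toList 0 0

-- ===== PORT B =====
-- the 'while lo < hi' binary search (lst[mid] is in range whenever 0 ≤ lo ≤ mid < hi ≤ len; pyGetD is exact there)
def pvBisect (lst : List Int) (cur : Int) (lo hi : Int) : Int :=
  if h : lo < hi then
    let mid := PySem.Int.floordiv (lo + hi) 2
    if PySem.List.pyGetD lst mid 0 > cur then pvBisect lst cur lo mid
    else pvBisect lst cur (mid + 1) hi
  else lo
termination_by (hi - lo).toNat
decreasing_by
  all_goals
    simp only [mid, PySem.Int.floordiv_eq_ediv_of_pos (by norm_num : (0:Int) < 2)] at *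
    omega

-- 'for idx, ch in enumerate(t): pos.setdefault(ch, []).append(idx)'
def pvBuildPos (ts : List Char) : PySem.Dict Char (List Int) :=
  (PySem.List.enumerate ts).foldl (fun d p => d.modify p.2 [] (· ++ [p.1])) PySem.Dict.empty

-- 'for ch in sub:' body — early 'return False' is the none result
def pvMatchSub (pos : PySem.Dict Char (List Int)) : List Char → Int → Option Int
  | [], cur => some cur
  | ch :: rest, cur =>
    let lst := pos.getD ch []
    let lo := pvBisect lst cur 0 (lst.length : Int)
    if lo = (lst.length : Int) then none
    else pvMatchSub pos rest (PySem.List.pyGetD lst lo 0)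

-- 'for _ in range(k)' with early return, as fuel recursion on k.toNat
def pvCopies (pos : PySem.Dict Char (List Int)) (sub : List Char) : Nat → Int → Bool
  | 0, _ => true
  | n + 1, cur =>
    match pvMatchSub pos sub cur with
    | none => false
    | some cur' => pvCopies pos sub n cur'

def isK_alt (sub : String) (t : String) (k : Int) : Bool :=
  if sub.toList.length = 0 ∨ k ≤ 0 then false      -- if not sub or k <= 0
  else pvCopies (pvBuildPos t.toList) sub.toList k.toNat (-1)

-- ===== PRECONDITION & SPEC =====
def Spec_isK (sub : String) (t : String) (k : Int) (out : Bool) : Prop := out = isK_alt sub t k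
instance (sub : String) (t : String) (k : Int) (out : Bool) : Decidable (Spec_isK sub t k out) := by unfold Spec_isK; infer_instance

-- ===== CLAIM (what is proved, stated in full; the proofs are below) =====
def Claim_equal_isK : Prop := ∀ (sub : String) (t : String) (k : Int), Dom_isK sub t k → Spec_isK sub t k (isK sub t k)

-- ===== LEMMAS AND PROOFS =====

def pvOccs : List Char → Char → List Nat
  | [], _ => []
  | c :: cs, ch => if c = ch then 0 :: (pvOccs cs ch).map (· + 1) else (pvOccs cs ch).map (· + 1)

lemma occs_pairwise (ts : List Char) (ch : Char) : (pvOccs ts ch).Pairwise (· < ·) := by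
  induction ts with
  | nil => simp [pvOccs]
  | cons c cs ih =>
    have hmap : ((pvOccs cs ch).map (· + 1)).Pairwise (· < ·) := by
      rw [List.pairwise_map]; exact ih.imp (by omega)
    by_cases hc : c = ch
    · simp only [pvOccs, if_pos hc, List.pairwise_cons]
      exact ⟨by simp, hmap⟩
    · simpa only [pvOccs, if_neg hc] using hmap

lemma filter_eq_drop_of {α : Type} (p : α → Bool) : ∀ (l : List α) (r : Nat), r ≤ l.length →
    (∀ (i : Nat) (h : i < l.length), i < r → p l[i] = false) →
    (∀ (i : Nat) (h : i < l.length), r ≤ i → p l[i] = true) →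
    l.filter p = l.drop r := by
  intro l
  induction l with
  | nil => intro r _ _ _; simp
  | cons x xs ih =>
    intro r hr h1 h2
    cases r with
    | zero =>
      rw [List.drop_zero, List.filter_eq_self]
      intro a ha
      obtain ⟨i, hi, rfl⟩ := List.mem_iff_getElem.mp ha
      exact h2 i hi (Nat.zero_le _)
    | succ r' =>
      have hx : p x = false := h1 0 (by simp) (by omega)
      rw [List.filter_cons_of_neg (by simp [hx]), List.drop_succ_cons]
      exact ih r' (by simpa using hr)
        (fun i h hlt => h1 (i+1) (by simpa using h) (by omega))
        (fun i h hge => h2 (i+1) (by simpa using h) (by omega))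

def pvMatchOne : List Char → List Char → Option (List Char)
  | [], s => some s
  | _ :: _, [] => none
  | p :: ps, c :: cs => if c = p then pvMatchOne ps cs else pvMatchOne (p :: ps) cs
termination_by pat s => s.length + pat.length

lemma matchOne_cons_occs (ch : Char) (ps : List Char) : ∀ (s : List Char),
    pvMatchOne (ch :: ps) s = match pvOccs s ch with
      | [] => none
      | m :: _ => pvMatchOne ps (s.drop (m + 1)) := by
  intro s
  induction s with
  | nil => simp [pvMatchOne, pvOccs]
  | cons c cs ih =>
    by_cases hc : c = ch
    · simp [pvMatchOne, pvOccs, hc]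
    · rw [show pvMatchOne (ch :: ps) (c :: cs) = pvMatchOne (ch :: ps) cs by
        simp [pvMatchOne, hc], ih]
      simp only [pvOccs, if_neg hc]
      cases hno : pvOccs cs ch with
      | nil => simp
      | cons m tl => simp [List.drop_succ_cons]

lemma occs_drop (ch : Char) : ∀ (ts : List Char) (q : Nat),
    pvOccs (ts.drop q) ch = ((pvOccs ts ch).filter (fun m => decide (q ≤ m))).map (· - q) := by
  intro ts
  induction ts with
  | nil => intro q; simp [pvOccs]
  | cons c cs ih =>
    intro q
    cases q with
    | zero =>
      rw [List.drop_zero, List.filter_eq_self.mpr (by intro a _; simp)]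
      simp [List.map_id'']
    | succ q' =>
      rw [List.drop_succ_cons, ih q']
      have hfm : ∀ (l : List Nat), (l.map (· + 1)).filter (fun m => decide (q' + 1 ≤ m))
          = (l.filter (fun m => decide (q' ≤ m))).map (· + 1) := by
        intro l
        rw [List.filter_map]
        congr 1
        apply List.filter_congr
        intro a _
        simp only [Function.comp_apply, decide_eq_decide]
        omega
      by_cases hc : c = ch
      · simp only [pvOccs, if_pos hc, List.filter_cons]
        rw [if_neg (by simp), hfm, List.map_map]
        congr 1
        funext m; simp
      · simp only [pvOccs, if_neg hc]
        rw [hfm, List.map_map]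
        congr 1
        funext m; simp

lemma matchOne_append (a b : List Char) : ∀ (s : List Char),
    pvMatchOne (a ++ b) s = (pvMatchOne a s).bind (pvMatchOne b) := by
  intro s
  induction s generalizing a with
  | nil =>
    cases a with
    | nil => simp [pvMatchOne]
    | cons p ps => simp [pvMatchOne]
  | cons c cs ih =>
    cases a with
    | nil => simp [pvMatchOne]
    | cons p ps =>
      rw [List.cons_append, pvMatchOne, pvMatchOne]
      split_ifs with h
      · exact ih ps
      · exact ih (p :: ps)

lemma pvOccs_cons (c : Char) (cs : List Char) (ch : Char) :
    pvOccs (c :: cs) ch = if c = ch then 0 :: (pvOccs cs ch).map (· + 1) else (pvOccs cs ch).map (· + 1) := rfl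

lemma map_cast_shift (l : List Nat) (n : Int) :
    (l.map (· + 1)).map (fun (m : Nat) => (m : Int) + n) = l.map (fun (m : Nat) => (m : Int) + (n + 1)) := by
  rw [List.map_map]
  apply List.map_congr_left
  intro m _
  simp only [Function.comp_apply]
  push_cast
  ring

lemma buildPos_getD_aux (ch : Char) (ts : List Char) : ∀ (n : Int) (d : PySem.Dict Char (List Int)),
    ((PySem.List.enumerate ts n).foldl (fun d p => d.modify p.2 [] (· ++ [p.1])) d).getD ch []
      = d.getD ch [] ++ (pvOccs ts ch).map (fun (m : Nat) => (m : Int) + n) := by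
  induction ts with
  | nil => intro n d; simp [PySem.List.enumerate_nil, pvOccs]
  | cons c cs ih =>
    intro n d
    rw [PySem.List.enumerate_cons, List.foldl_cons, ih]
    by_cases hc : c = ch
    · subst hc
      rw [PySem.Dict.getD_modify_self, pvOccs_cons, if_pos rfl, List.map_cons, map_cast_shift,
        List.append_assoc]
      congr 2
      simp
    · rw [PySem.Dict.getD_modify_of_ne _ _ _ (Ne.symm hc), pvOccs_cons, if_neg hc, map_cast_shift]

lemma buildPos_getD (ts : List Char) (ch : Char) :
    (pvBuildPos ts).getD ch [] = (pvOccs ts ch).map (fun (m : Nat) => (m : Int)) := by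
  rw [pvBuildPos, buildPos_getD_aux]
  simp [PySem.Dict.getD_empty]

lemma pvBisect_spec (lst : List Int) (cur : Int) (hs : lst.Pairwise (· < ·)) :
    ∀ (fuel : Nat) (lo hi : Int), (hi - lo).toNat ≤ fuel → 0 ≤ lo → lo ≤ hi → hi ≤ (lst.length : Int) →
    (∀ (i : Nat) (h : i < lst.length), (i : Int) < lo → lst[i] ≤ cur) →
    (∀ (i : Nat) (h : i < lst.length), hi ≤ (i : Int) → cur < lst[i]) →
    lo ≤ pvBisect lst cur lo hi ∧ pvBisect lst cur lo hi ≤ hi ∧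
    (∀ (i : Nat) (h : i < lst.length), (i : Int) < pvBisect lst cur lo hi → lst[i] ≤ cur) ∧
    (∀ (i : Nat) (h : i < lst.length), pvBisect lst cur lo hi ≤ (i : Int) → cur < lst[i]) := by
  have hmono := List.pairwise_iff_getElem.mp hs
  intro fuel
  induction fuel with
  | zero =>
    intro lo hi hf h0 hlh hhl hL hR
    have : ¬ lo < hi := by omega
    rw [pvBisect, dif_neg this]
    exact ⟨le_rfl, hlh, hL, fun i h hge => hR i h (by omega)⟩
  | succ fuel ih =>
    intro lo hi hf h0 hlh hhl hL hR
    by_cases hlt : lo < hi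
    · rw [pvBisect, dif_pos hlt]
      simp only []
      set mid := PySem.Int.floordiv (lo + hi) 2 with hmid
      have hmb : lo ≤ mid ∧ mid < hi := by
        rw [hmid, PySem.Int.floordiv_eq_ediv_of_pos (by norm_num : (0:Int) < 2)]
        omega
      have hmn : mid.toNat < lst.length := by omega
      have hmnc : (mid.toNat : Int) = mid := by omega
      have hget : PySem.List.pyGetD lst mid 0 = lst[mid.toNat] := by
        have h := PySem.List.pyGetD_natCast lst mid.toNat (0 : Int)
        rw [hmnc] at h
        rw [h, List.getD_eq_getElem _ _ hmn]
      rw [hget]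
      split_ifs with hcmp
      · -- lst[mid] > cur : hi := mid
        have hR' : ∀ (i : Nat) (h : i < lst.length), mid ≤ (i : Int) → cur < lst[i] := by
          intro i h hge
          rcases eq_or_lt_of_le hge with heq | hlt2
          · have hieq : i = mid.toNat := by omega
            subst hieq; exact hcmp
          · calc cur < lst[mid.toNat] := hcmp
              _ < lst[i] := hmono mid.toNat i hmn h (by omega)
        obtain ⟨a, b, c, d2⟩ := ih lo mid (by omega) h0 hmb.1 (by omega) hL hR'
        exact ⟨a, by omega, c, d2⟩
      · -- lst[mid] ≤ cur : lo := mid + 1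
        rw [not_lt] at hcmp
        have hL' : ∀ (i : Nat) (h : i < lst.length), (i : Int) < mid + 1 → lst[i] ≤ cur := by
          intro i h hlt2
          rcases Nat.lt_or_ge i mid.toNat with h2 | h2
          · exact le_trans (le_of_lt (hmono i mid.toNat h hmn h2)) hcmp
          · have hieq : i = mid.toNat := by omega
            subst hieq; exact hcmp
        obtain ⟨a, b, c, d2⟩ := ih (mid + 1) hi (by omega) (by omega) (by omega) hhl hL' hR
        exact ⟨by omega, b, c, d2⟩
    · rw [pvBisect, dif_neg hlt]
      exact ⟨le_rfl, hlh, fun i h hlt2 => hL i h hlt2, fun i h hge => hR i h (by omega)⟩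

lemma matchSub_corr (ts : List Char) : ∀ (chs : List Char) (cur : Int), -1 ≤ cur →
    (match pvMatchSub (pvBuildPos ts) chs cur with
     | none => pvMatchOne chs (ts.drop (cur + 1).toNat) = none
     | some cur' => -1 ≤ cur' ∧
         pvMatchOne chs (ts.drop (cur + 1).toNat) = some (ts.drop (cur' + 1).toNat)) := by
  intro chs
  induction chs with
  | nil =>
    intro cur hcur
    simp [pvMatchSub, pvMatchOne, hcur]
  | cons ch rest ih =>
    intro cur hcur
    simp only [pvMatchSub]
    set no := pvOccs ts ch with hno
    set lst := (pvBuildPos ts).getD ch [] with hlst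
    have hchar : lst = no.map (fun (m : Nat) => (m : Int)) := buildPos_getD ts ch
    have hlen : lst.length = no.length := by rw [hchar, List.length_map]
    have hsorted : lst.Pairwise (· < ·) := by
      rw [hchar, List.pairwise_map]
      exact (occs_pairwise ts ch).imp (by intro a b h; exact_mod_cast h)
    have hspec := pvBisect_spec lst cur hsorted ((lst.length : Int) - 0).toNat 0 (lst.length : Int)
      le_rfl le_rfl (by omega) le_rfl (by intro i h hlt; omega) (by intro i h hge; omega)
    obtain ⟨hr0, hrlen, hLeft, hRight⟩ := hspec
    set r := pvBisect lst cur 0 (lst.length : Int) with hr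
    set q := (cur + 1).toNat with hq
    have hqc : (q : Int) = cur + 1 := by omega
    have hlstel : ∀ (i : Nat) (h : i < no.length), lst[i]'(by omega) = (no[i] : Int) := by
      intro i h
      simp [hchar]
    have hF : no.filter (fun m => decide (q ≤ m)) = no.drop r.toNat := by
      apply filter_eq_drop_of
      · omega
      · intro i h hlt
        have h2 := hLeft i (by omega) (by omega)
        rw [hlstel i h] at h2
        simp only [decide_eq_false_iff_not]
        omega
      · intro i h hge
        have h2 := hRight i (by omega) (by omega)
        rw [hlstel i h] at h2
        simp only [decide_eq_true_eq]
        omega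
    have hod := occs_drop ch ts q
    rw [← hno] at hod
    rw [hF] at hod
    by_cases hrl : r = (lst.length : Int)
    · rw [if_pos hrl]
      rw [matchOne_cons_occs, hod]
      have : no.drop r.toNat = [] := by
        apply List.drop_eq_nil_of_le
        omega
      rw [this]
      simp
    · rw [if_neg hrl]
      have hrlt : r.toNat < no.length := by omega
      set m0 := no[r.toNat] with hm0
      have hcur' : PySem.List.pyGetD lst r 0 = (m0 : Int) := by
        have h := PySem.List.pyGetD_natCast lst r.toNat (0 : Int)
        rw [show ((r.toNat : Nat) : Int) = r by omega] at h
        rw [h, List.getD_eq_getElem _ _ (by omega), hlstel r.toNat hrlt]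
      have hqm0 : q ≤ m0 := by
        have h2 := hRight r.toNat (by omega) (by omega)
        rw [hlstel r.toNat hrlt] at h2
        omega
      have hdropno : no.drop r.toNat = m0 :: no.drop (r.toNat + 1) := List.drop_eq_getElem_cons hrlt
      have hmo : pvMatchOne (ch :: rest) (ts.drop q) = pvMatchOne rest (ts.drop (m0 + 1)) := by
        rw [matchOne_cons_occs, hod, hdropno, List.map_cons]
        show pvMatchOne rest ((ts.drop q).drop (m0 - q + 1)) = _
        rw [List.drop_drop, show q + (m0 - q + 1) = m0 + 1 from by omega]
      rw [hcur']
      have hm0c : ((m0 : Int) + 1).toNat = m0 + 1 := by omega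
      have hih := ih (m0 : Int) (by omega)
      rw [hm0c] at hih
      cases hms : pvMatchSub (pvBuildPos ts) rest (m0 : Int) with
      | none =>
        rw [hms] at hih
        rw [hmo]
        exact hih
      | some cur' =>
        rw [hms] at hih
        exact ⟨hih.1, by rw [hmo]; exact hih.2⟩
lemma copies_corr (ts sub : List Char) : ∀ (n : Nat) (cur : Int), -1 ≤ cur →
    pvCopies (pvBuildPos ts) sub n cur
      = (pvMatchOne ((List.replicate n sub).flatten) (ts.drop (cur + 1).toNat)).isSome := by
  intro n
  induction n with
  | zero => intro cur _; simp [pvCopies, pvMatchOne]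
  | succ n ih =>
    intro cur hcur
    rw [List.replicate_succ, List.flatten_cons]
    simp only [pvCopies]
    have h := matchSub_corr ts sub cur hcur
    rw [matchOne_append]
    cases hms : pvMatchSub (pvBuildPos ts) sub cur with
    | none =>
      rw [hms] at h
      rw [h]
      rfl
    | some cur' =>
      rw [hms] at h
      rw [h.2]
      rw [show ((some (ts.drop (cur' + 1).toNat)).bind (pvMatchOne (List.replicate n sub).flatten))
            = pvMatchOne (List.replicate n sub).flatten (ts.drop (cur' + 1).toNat) from rfl]
      exact ih cur' h.1

lemma isKLoop_corr (sub : List Char) (k : Int) : ∀ (ts : List Char) (count i : Int),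
    0 ≤ count → count < k → 0 ≤ i → i < (sub.length : Int) →
    isKLoop sub k ts count i
      = (pvMatchOne (sub.drop i.toNat ++ (List.replicate (k - count - 1).toNat sub).flatten) ts).isSome := by
  intro ts
  induction ts with
  | nil =>
    intro count i h1 h2 h3 h4
    have hin : i.toNat < sub.length := by omega
    rw [List.drop_eq_getElem_cons hin, List.cons_append, isKLoop, pvMatchOne]
    rfl
  | cons ch cs ih =>
    intro count i h1 h2 h3 h4
    have hin : i.toNat < sub.length := by omega
    have hic : ((i.toNat : Nat) : Int) = i := by omega
    have hidx : PySem.List.pyGet? sub i = some sub[i.toNat] := by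
      have h := PySem.List.pyGet?_natCast sub i.toNat
      rw [hic] at h
      rw [h, List.getElem?_eq_getElem hin]
    have hdrop : sub.drop i.toNat = sub[i.toNat] :: sub.drop (i.toNat + 1) := List.drop_eq_getElem_cons hin
    rw [isKLoop, hdrop, List.cons_append]
    by_cases hch : ch = sub[i.toNat]
    · rw [if_pos ⟨h4, by rw [hidx, hch]⟩]
      have hred : pvMatchOne (sub[i.toNat] :: (sub.drop (i.toNat + 1) ++ (List.replicate (k - count - 1).toNat sub).flatten)) (ch :: cs)
          = pvMatchOne (sub.drop (i.toNat + 1) ++ (List.replicate (k - count - 1).toNat sub).flatten) cs := by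
        rw [pvMatchOne, if_pos hch]
      rw [hred]
      by_cases hend : i + 1 = (sub.length : Int)
      · have hdnil : sub.drop (i.toNat + 1) = [] := List.drop_eq_nil_of_le (by omega)
        rw [hdnil, List.nil_append]
        by_cases hcnt : count + 1 = k
        · rw [if_pos hend, if_pos hcnt]
          have : (k - count - 1).toNat = 0 := by omega
          rw [this]
          simp [pvMatchOne]
        · rw [if_pos hend, if_neg hcnt]
          rw [ih (count + 1) 0 (by omega) (by omega) le_rfl (by omega)]
          have hrep : (k - count - 1).toNat = (k - (count + 1) - 1).toNat + 1 := by omega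
          rw [hrep, List.replicate_succ, List.flatten_cons]
          simp
      · rw [if_neg hend]
        rw [ih count (i + 1) h1 h2 (by omega) (by omega)]
        have : (i + 1).toNat = i.toNat + 1 := by omega
        rw [this]
    · rw [if_neg (by rintro ⟨-, hp⟩; rw [hidx] at hp; exact hch (Option.some.inj hp).symm)]
      have hred : pvMatchOne (sub[i.toNat] :: (sub.drop (i.toNat + 1) ++ (List.replicate (k - count - 1).toNat sub).flatten)) (ch :: cs)
          = pvMatchOne (sub[i.toNat] :: (sub.drop (i.toNat + 1) ++ (List.replicate (k - count - 1).toNat sub).flatten)) cs := by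
        rw [pvMatchOne, if_neg hch]
      rw [hred, ← List.cons_append, ← hdrop]
      exact ih count i h1 h2 h3 h4

-- with an empty pattern A's inner condition never fires and the loop returns False
lemma isKLoop_nil_sub (k : Int) (ts : List Char) : ∀ count i : Int, isKLoop [] k ts count i = false := by
  induction ts with
  | nil => intro count i; rfl
  | cons ch rest ih =>
    intro count i
    simp only [isKLoop]
    rw [if_neg (by rintro ⟨-, h2⟩; simp [PySem.List.pyGet?, PySem.List.pyIdx?] at h2)]
    exact ih count i

-- with k ≤ 0 the counter (which stays ≥ 0) can never reach k, so A returns False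
lemma isKLoop_nonpos (sub : List Char) (k : Int) (hk : k ≤ 0) (ts : List Char) :
    ∀ count i : Int, 0 ≤ count → isKLoop sub k ts count i = false := by
  induction ts with
  | nil => intro count i _; rfl
  | cons ch rest ih =>
    intro count i hc
    simp only [isKLoop]
    split_ifs with h1 h2 h3
    · exact absurd h3 (by omega)
    · exact ih (count + 1) 0 (by omega)
    · exact ih count (i + 1) hc
    · exact ih count i hc

-- ===== VERDICT (by name: the statement is the Claim_ definition above) =====
theorem isK_spec : Claim_equal_isK := by
  intro sub t k _
  unfold Spec_isK isK isK_alt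
  by_cases hdeg : sub.toList.length = 0 ∨ k ≤ 0
  · rw [if_pos hdeg]
    rcases hdeg with hnil | hk
    · rw [List.length_eq_zero_iff.mp hnil]
      exact isKLoop_nil_sub k t.toList 0 0
    · exact isKLoop_nonpos sub.toList k hk t.toList 0 0 le_rfl
  · rw [if_neg hdeg]
    rw [not_or, not_le] at hdeg
    obtain ⟨hne, hk⟩ := hdeg
    rw [copies_corr t.toList sub.toList k.toNat (-1) (by omega)]
    rw [isKLoop_corr sub.toList k t.toList 0 0 le_rfl (by omega) le_rfl (by omega)]
    have hrep : List.replicate k.toNat sub.toList = sub.toList :: List.replicate (k - 0 - 1).toNat sub.toList := by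
      have : k.toNat = (k - 0 - 1).toNat + 1 := by omega
      rw [this, List.replicate_succ]
    simp [hrep]
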